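-- pv_equiv track=rewrite | github.com/shaneholloman/osaurus | scripts/ingest_locomo.py | pair_turns
-- ===== SOURCE A (Python) =====
-- def pair_turns(turns: list[dict]) -> list[dict]:
--     """Pair consecutive speaker turns into user/assistant exchanges."""
--     pairs = []
--     i = 0
--     while i < len(turns) - 1:
--         pairs.append({
--             "user": f"{turns[i]['speaker']}: {turns[i]['text']}",
--             "assistant": f"{turns[i+1]['speaker']}: {turns[i+1]['text']}",
--         })
--         i += 2
--     if i < len(turns):
--         pairs.append({
--             "user": f"{turns[i]['speaker']}: {turns[i]['text']}",
--             "assistant": "(no response)",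
--         })
--     return pairs
-- ===== SOURCE B (Python) =====
-- def pair_turns(turns: list[dict]) -> list[dict]:
--     """Pair consecutive speaker turns into user/assistant exchanges."""
--     msgs = [f"{t['speaker']}: {t['text']}" for t in turns]
--     if len(msgs) % 2:
--         msgs.append("(no response)")
--     return [{"user": u, "assistant": a} for u, a in zip(msgs[0::2], msgs[1::2])]
-- ===== Notes on version B (the rewrite author's own statement) =====
-- stated objective: alternative
-- what changed: B is staged: first one pass formats every turn to 'speaker: text' strings, then the list is padded with the literal '(no response)' to even length, then the two strided slices msgs[0::2] and msgs[1::2] are zipped into dicts - no index-stepping loop and no trailing-element output branch (the leftover case is folded into the padding).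
import Mathlib
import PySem

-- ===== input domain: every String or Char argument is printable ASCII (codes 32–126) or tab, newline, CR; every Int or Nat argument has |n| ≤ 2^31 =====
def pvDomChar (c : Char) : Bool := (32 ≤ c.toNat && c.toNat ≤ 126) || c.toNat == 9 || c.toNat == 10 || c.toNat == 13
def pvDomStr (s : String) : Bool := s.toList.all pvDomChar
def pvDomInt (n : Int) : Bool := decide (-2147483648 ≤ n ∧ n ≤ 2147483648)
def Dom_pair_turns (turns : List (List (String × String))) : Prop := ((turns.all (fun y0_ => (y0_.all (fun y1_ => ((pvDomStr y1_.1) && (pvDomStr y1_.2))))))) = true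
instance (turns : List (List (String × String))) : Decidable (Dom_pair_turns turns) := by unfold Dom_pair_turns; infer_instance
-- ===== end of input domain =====

-- B replaces A's index-stepping while-loop + trailing output branch by three stages:
-- format every turn, pad the string list with "(no response)" to even length, zip the two
-- strided slices msgs[0::2]/msgs[1::2] into dicts; objective: alternative (same cost).

-- ===== PORT A =====
-- f"{t['speaker']}: {t['text']}" (shared by both sources verbatim); exact via PySem.Dict lookup,
-- concatenation done on the char-list side (Pre_ guarantees both keys are present).
def fmtTurn (t : List (String × String)) : String :=
  String.ofList ((PySem.Dict.getD (PySem.Dict.mk t) "speaker" "").toList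
    ++ ':' :: ' ' :: (PySem.Dict.getD (PySem.Dict.mk t) "text" "").toList)

-- the 'while i < len(turns) - 1' loop; returns (pairs, i) at loop exit
def pairALoop (turns : List (List (String × String))) (i : Int)
    (pairs : List (List (String × String))) : List (List (String × String)) × Int :=
  if i < (turns.length : Int) - 1 then
    pairALoop turns (i + 2)
      (pairs ++ [[("user", fmtTurn (PySem.List.pyGetD turns i [])),
                  ("assistant", fmtTurn (PySem.List.pyGetD turns (i + 1) []))]])
  else (pairs, i)
termination_by ((turns.length : Int) + 1 - i).toNat
decreasing_by omega

def pair_turns (turns : List (List (String × String))) : List (List (String × String)) :=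
  let res := pairALoop turns 0 []
  if res.2 < (turns.length : Int) then
    res.1 ++ [[("user", fmtTurn (PySem.List.pyGetD turns res.2 [])),
               ("assistant", "(no response)")]]
  else res.1

-- ===== PORT B =====
-- msgs[0::2] (a stride-2 slice; PySem has no step slices, so ported by hand: exact, it keeps
-- the elements at even positions; msgs[1::2] is everyOther of the tail).
def everyOther {α : Type} : List α → List α
  | a :: _ :: r => a :: everyOther r
  | [a] => [a]
  | [] => []

def pair_turns_alt (turns : List (List (String × String))) : List (List (String × String)) :=
  let msgs := turns.map fmtTurn
  let msgs2 := if PySem.Int.mod (msgs.length : Int) 2 ≠ 0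
               then msgs ++ ["(no response)"] else msgs
  (List.zip (everyOther msgs2) (everyOther (msgs2.drop 1))).map
    (fun p => [("user", p.1), ("assistant", p.2)])

-- ===== PRECONDITION & SPEC =====
-- Pre_ excludes exactly the inputs on which Python A raises KeyError: some turn lacks 'speaker' or 'text'.
def Pre_pair_turns (turns : List (List (String × String))) : Prop :=
  (turns.all (fun t => (PySem.Dict.mk t).contains "speaker" && (PySem.Dict.mk t).contains "text")) = true
instance (turns : List (List (String × String))) : Decidable (Pre_pair_turns turns) := by
  unfold Pre_pair_turns; infer_instance

def pvWitness_pair_turns : (List (List (String × String))) :=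
  [[("speaker", "Ann"), ("text", "hi")], [("speaker", "Bob"), ("text", "yo")],
   [("speaker", "Ann"), ("text", "bye")]]

def Spec_pair_turns (turns : List (List (String × String))) (out : List (List (String × String))) : Prop := out = pair_turns_alt turns
instance (turns : List (List (String × String))) (out : List (List (String × String))) : Decidable (Spec_pair_turns turns out) := by unfold Spec_pair_turns; infer_instance

-- ===== CLAIM (what is proved, stated in full; the proofs are below) =====
def Claim_equal_pair_turns : Prop := ∀ (turns : List (List (String × String))), Dom_pair_turns turns → Pre_pair_turns turns → Spec_pair_turns turns (pair_turns turns)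

-- ===== LEMMAS AND PROOFS =====

-- proof-side: consume a list two at a time
def pairUp {α : Type} : List α → List (α × α)
  | a :: b :: r => (a, b) :: pairUp r
  | _ => []

-- one entry of the output, as A builds it
def pairEnt (u a : List (String × String)) : List (String × String) :=
  [("user", fmtTurn u), ("assistant", fmtTurn a)]

theorem length_pairUp {α : Type} (xs : List α) : (pairUp xs).length = xs.length / 2 := by
  induction xs using pairUp.induct with
  | case1 a b r ih => simp [pairUp, ih]; omega
  | case2 t h =>
    match t, h with
    | [], _ => simp [pairUp]
    | [a], _ => simp [pairUp]
    | a :: b :: r, h => exact (h a b r rfl).elim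

-- zip of the two strided slices is exactly pairwise chunking
theorem zip_everyOther {α : Type} (l : List α) :
    List.zip (everyOther l) (everyOther (l.drop 1)) = pairUp l := by
  induction l using pairUp.induct with
  | case1 a b r ih => simp [everyOther, pairUp]; cases r <;> simp_all [everyOther]
  | case2 t h =>
    match t, h with
    | [], _ => simp [everyOther, pairUp]
    | [a], _ => simp [everyOther, pairUp]
    | a :: b :: r, h => exact (h a b r rfl).elim

theorem pairUp_map {α β : Type} (f : α → β) (l : List α) :
    pairUp (l.map f) = (pairUp l).map (fun p => (f p.1, f p.2)) := by
  induction l using pairUp.induct with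
  | case1 a b r ih => simp [pairUp, ih]
  | case2 t h =>
    match t, h with
    | [], _ => simp [pairUp]
    | [a], _ => simp [pairUp]
    | a :: b :: r, h => exact (h a b r rfl).elim

theorem pairUp_append_singleton {α : Type} (l : List α) (x : α) (h : l.length % 2 = 1)
    (hne : l ≠ []) :
    pairUp (l ++ [x]) = pairUp l ++ [(l.getLast hne, x)] := by
  induction l using pairUp.induct with
  | case1 a b r ih =>
    cases r with
    | nil => simp at h
    | cons c s =>
      have h' : (c :: s).length % 2 = 1 := by simp at h ⊢; omega
      simp only [List.cons_append] at ih ⊢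
      simp only [pairUp]
      rw [ih h' (by simp)]
      simp [List.getLast]
  | case2 t h2 =>
    match t, h2 with
    | [], _ => exact absurd rfl hne
    | [a], _ => simp [pairUp, List.getLast]
    | a :: b :: r, h2 => exact (h2 a b r rfl).elim

theorem pairALoop_eq (rest turns : List (List (String × String))) (k : Nat)
    (pairs : List (List (String × String))) (hd : turns.drop (2 * k) = rest) :
    pairALoop turns ((2 * k : Nat) : Int) pairs =
      (pairs ++ (pairUp rest).map (fun ua => pairEnt ua.1 ua.2),
       ((2 * k + 2 * (pairUp rest).length : Nat) : Int)) := by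
  induction rest using pairUp.induct generalizing k pairs with
  | case1 a b r ih =>
    have hlen : 2 * k + 2 ≤ turns.length := by
      have := congrArg List.length hd
      simp [List.length_drop] at this
      omega
    have hguard : ((2 * k : Nat) : Int) < (turns.length : Int) - 1 := by
      push_cast; omega
    have ha : turns[2 * k]? = some a := by
      have h0 : (turns.drop (2 * k))[0]? = some a := by rw [hd]; rfl
      simpa [List.getElem?_drop] using h0
    have hb : turns[2 * k + 1]? = some b := by
      have h1 : (turns.drop (2 * k))[1]? = some b := by rw [hd]; rfl
      simpa [List.getElem?_drop] using h1
    have hr : turns.drop (2 * (k + 1)) = r := by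
      have h2 : turns.drop (2 * k + 2) = (turns.drop (2 * k)).drop 2 := by
        rw [List.drop_drop]
      rw [show 2 * (k + 1) = 2 * k + 2 by ring, h2, hd]; rfl
    rw [pairALoop, if_pos hguard]
    have hga : PySem.List.pyGetD turns ((2 * k : Nat) : Int) [] = a := by
      rw [PySem.List.pyGetD_natCast]; simp [List.getD, ha]
    have hgb : PySem.List.pyGetD turns (((2 * k : Nat) : Int) + 1) [] = b := by
      rw [show ((2 * k : Nat) : Int) + 1 = ((2 * k + 1 : Nat) : Int) by push_cast; ring]
      rw [PySem.List.pyGetD_natCast]; simp [List.getD, hb]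
    rw [hga, hgb]
    rw [show ((2 * k : Nat) : Int) + 2 = ((2 * (k + 1) : Nat) : Int) by push_cast; ring]
    rw [ih (k + 1) _ hr]
    refine Prod.ext ?_ ?_
    · simp [pairUp, pairEnt, List.append_assoc]
    · simp [pairUp]; ring
  | case2 t h =>
    match t, h with
    | a :: b :: r, h => exact (h a b r rfl).elim
    | [], _ =>
      have hlen : turns.length ≤ 2 * k := by
        have := congrArg List.length hd
        simp [List.length_drop] at this
        omega
      rw [pairALoop, if_neg (by push_cast; omega)]
      simp [pairUp]
    | [a], _ =>
      have hlen : turns.length = 2 * k + 1 := by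
        have := congrArg List.length hd
        simp [List.length_drop] at this
        omega
      rw [pairALoop, if_neg (by push_cast; omega)]
      simp [pairUp]

theorem pair_turns_eq_alt (turns : List (List (String × String))) :
    pair_turns turns = pair_turns_alt turns := by
  have h0 := pairALoop_eq turns turns 0 [] (by simp)
  simp only [Nat.mul_zero, Nat.cast_zero, Nat.zero_add] at h0
  unfold pair_turns pair_turns_alt
  rw [h0]
  simp only [zip_everyOther, length_pairUp, List.length_map]
  by_cases hodd : turns.length % 2 = 1
  · have hne : turns ≠ [] := by
      intro h; subst h; simp at hodd
    have hmne : turns.map fmtTurn ≠ [] := by simpa using hne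
    have hidx : 2 * (turns.length / 2) = turns.length - 1 := by omega
    rw [if_pos (by push_cast; omega : ((2 * (turns.length / 2) : Nat) : Int) < (turns.length : Int))]
    have hmod : PySem.Int.mod ((turns.length : Nat) : Int) 2 ≠ 0 := by
      rw [show (2 : Int) = ((2 : Nat) : Int) by rfl, PySem.Int.mod_natCast]
      simp [hodd]
    rw [if_pos hmod]
    rw [pairUp_append_singleton (turns.map fmtTurn) _ (by simpa using hodd) hmne]
    rw [pairUp_map]
    have hlast : PySem.List.pyGetD turns ((2 * (turns.length / 2) : Nat) : Int) [] =
        turns.getLast hne := by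
      rw [PySem.List.pyGetD_natCast]
      rw [List.getLast_eq_getElem]
      have hlt : turns.length - 1 < turns.length := by
        cases turns with
        | nil => exact absurd rfl hne
        | cons x xs => simp
      simp [List.getD, List.getElem?_eq_getElem hlt, hidx]
    rw [hlast]
    simp [pairEnt, List.getLast_map]
  · have heven : turns.length % 2 = 0 := by omega
    rw [if_neg (by push_cast; omega : ¬ ((2 * (turns.length / 2) : Nat) : Int) < (turns.length : Int))]
    rw [if_neg (by rw [show (2 : Int) = ((2 : Nat) : Int) by rfl, PySem.Int.mod_natCast]; simp [heven])]
    rw [pairUp_map]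
    simp [pairEnt]

-- ===== VERDICT (by name: the statement is the Claim_ definition above) =====
theorem pair_turns_spec : Claim_equal_pair_turns := by
  intro turns _ _
  unfold Spec_pair_turns
  exact pair_turns_eq_alt turns
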